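-- pv_equiv track=rewrite | github.com/tand2me/ex-vim-file-explorer | Resources/netbeanArgs.py | backslashEscape
-- ===== SOURCE A (Python) =====
-- def backslashEscape( s ):
--     r'''Return s with characters \ \n \t \r " espcaped with a \ '''
--     l = list(s)
--     i = 0
--     while i < len(l):
--         if l[i] == '\\':
--             l[i:i+1] = ['\\', '\\' ]
--             i += 2
--             continue
--         elif l[i] == '\n':
--             l[i:i+1] = ['\\', 'n' ]
--             i += 2
--             continue
--         elif l[i] == '\t':
--             l[i:i+1] = ['\\', 't' ]
--             i += 2
--             continue
--         elif l[i] == '\r':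
--             l[i:i+1] = ['\\', 'r' ]
--             i += 2
--             continue
--         elif l[i] == '"':
--             l[i:i+1] = ['\\', '"' ]
--             i += 2
--             continue
--         i += 1
--     s = ''.join(l)
--     return s
-- ===== SOURCE B (Python) =====
-- def backslashEscape(s):
--     r'''Return s with characters \ \n \t \r " escaped with a \ '''
--     s = s.replace('\\', '\\\\')
--     s = s.replace('\n', '\\n')
--     s = s.replace('\t', '\\t')
--     s = s.replace('\r', '\\r')
--     s = s.replace('"', '\\"')
--     return s
-- ===== Notes on version B (the rewrite author's own statement) =====
-- stated objective: faster
-- what changed: Replaces A's index-driven in-place list splicing loop with a chain of five whole-string str.replace passes (backslash doubled first so later-inserted backslashes are never re-escaped); the built-in replace scans in C, removing the per-character Python-level loop.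
import Mathlib
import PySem

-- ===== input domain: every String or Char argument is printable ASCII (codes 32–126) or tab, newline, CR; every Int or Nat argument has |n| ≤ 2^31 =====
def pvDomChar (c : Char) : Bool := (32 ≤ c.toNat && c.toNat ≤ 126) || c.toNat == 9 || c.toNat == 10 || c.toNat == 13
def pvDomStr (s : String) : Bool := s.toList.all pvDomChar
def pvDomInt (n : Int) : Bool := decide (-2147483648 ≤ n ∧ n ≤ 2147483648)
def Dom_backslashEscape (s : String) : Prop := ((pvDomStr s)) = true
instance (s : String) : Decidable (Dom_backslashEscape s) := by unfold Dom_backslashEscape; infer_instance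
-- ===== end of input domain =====

-- B replaces A's index-driven in-place splicing scan by a chain of five whole-string
-- str.replace passes (backslash first); objective: idiomatic.

-- ===== PORT A =====
-- A's while loop scans the list left to right; on a special character it splices in the
-- two-character escape and resumes AFTER it, so each original character is visited once.
def escLoop : List Char → List Char
  | [] => []
  | c :: t =>
    if c = '\\' then '\\' :: '\\' :: escLoop t
    else if c = '\n' then '\\' :: 'n' :: escLoop t
    else if c = '\t' then '\\' :: 't' :: escLoop t
    else if c = '\r' then '\\' :: 'r' :: escLoop t
    else if c = '"' then '\\' :: '"' :: escLoop t
    else c :: escLoop t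

def backslashEscape (s : String) : String := String.ofList (escLoop s.toList)

-- ===== PORT B =====
def backslashEscape_alt (s : String) : String :=
  PySem.Str.replace
    (PySem.Str.replace
      (PySem.Str.replace
        (PySem.Str.replace
          (PySem.Str.replace s "\\" "\\\\")
          "\n" "\\n")
        "\t" "\\t")
      "\r" "\\r")
    "\"" "\\\""

-- ===== PRECONDITION & SPEC =====
def Spec_backslashEscape (s : String) (out : String) : Prop := out = backslashEscape_alt s
instance (s : String) (out : String) : Decidable (Spec_backslashEscape s out) := by unfold Spec_backslashEscape; infer_instance

-- ===== CLAIM (what is proved, stated in full; the proofs are below) =====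
def Claim_equal_backslashEscape : Prop := ∀ (s : String), Dom_backslashEscape s → Spec_backslashEscape s (backslashEscape s)

-- ===== LEMMAS AND PROOFS =====

-- single-character replace is a per-character flatMap
theorem go_single (a : Char) (ns : List Char) :
    ∀ (fuel : Nat) (l acc : List Char), l.length ≤ fuel →
      PySem.Chars.replace.go [a] ns fuel l acc
        = acc.reverse ++ l.flatMap (fun c => if c = a then ns else [c]) := by
  intro fuel
  induction fuel with
  | zero =>
    intro l acc h
    have : l = [] := List.eq_nil_of_length_eq_zero (Nat.le_zero.mp h)
    subst this
    simp [PySem.Chars.replace.go]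
  | succ n ih =>
    intro l acc h
    cases l with
    | nil => simp [PySem.Chars.replace.go]
    | cons c t =>
      by_cases hc : c = a
      · subst hc
        have hpre : List.isPrefixOf [c] (c :: t) = true := by
          simp [List.isPrefixOf]
        rw [PySem.Chars.replace.go]
        simp only [hpre, if_true]
        rw [ih]
        · simp
        · simpa using Nat.le_of_succ_le_succ h
      · have hpre : List.isPrefixOf [a] (c :: t) = false := by
          simp [List.isPrefixOf]
          exact fun h' => hc h'.symm
        rw [PySem.Chars.replace.go]
        simp only [hpre]
        rw [if_neg (by simp)]
        rw [ih]
        · simp [hc]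
        · simpa using Nat.le_of_succ_le_succ h

theorem replace_single (cs : List Char) (a : Char) (ns : List Char) :
    PySem.Chars.replace cs [a] ns = cs.flatMap (fun c => if c = a then ns else [c]) := by
  rw [PySem.Chars.replace]
  simp only [List.isEmpty_cons, if_false, Bool.false_eq_true]
  exact go_single a ns cs.length cs [] (le_refl _)

-- proof-side abbreviation for the per-character form
def repl (a : Char) (ns : List Char) (cs : List Char) : List Char :=
  cs.flatMap (fun c => if c = a then ns else [c])

theorem chain_eq_escLoop (cs : List Char) :
    repl '"' ['\\', '"']
      (repl '\r' ['\\', 'r']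
        (repl '\t' ['\\', 't']
          (repl '\n' ['\\', 'n']
            (repl '\\' ['\\', '\\'] cs)))) = escLoop cs := by
  induction cs with
  | nil => simp [repl, escLoop]
  | cons c t ih =>
    simp only [repl] at ih ⊢
    simp only [List.flatMap_cons, List.flatMap_append]
    by_cases h1 : c = '\\'
    · subst h1; simp [escLoop, ih]
    · by_cases h2 : c = '\n'
      · subst h2; simp [escLoop, ih]
      · by_cases h3 : c = '\t'
        · subst h3; simp [escLoop, ih]
        · by_cases h4 : c = '\r'
          · subst h4; simp [escLoop, ih]
          · by_cases h5 : c = '"'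
            · subst h5; simp [escLoop, ih]
            · simp [escLoop, h1, h2, h3, h4, h5, ih]

-- ===== VERDICT (by name: the statement is the Claim_ definition above) =====
theorem backslashEscape_spec : Claim_equal_backslashEscape := by
  unfold Claim_equal_backslashEscape
  intro s _
  unfold Spec_backslashEscape backslashEscape backslashEscape_alt
  simp only [PySem.Str.replace, String.toList_ofList,
    show ("\\".toList) = ['\\'] from rfl, show ("\\\\".toList) = ['\\', '\\'] from rfl,
    show ("\n".toList) = ['\n'] from rfl, show ("\\n".toList) = ['\\', 'n'] from rfl,
    show ("\t".toList) = ['\t'] from rfl, show ("\\t".toList) = ['\\', 't'] from rfl,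
    show ("\r".toList) = ['\r'] from rfl, show ("\\r".toList) = ['\\', 'r'] from rfl,
    show ("\"".toList) = ['"'] from rfl, show ("\\\"".toList) = ['\\', '"'] from rfl]
  rw [replace_single, replace_single, replace_single, replace_single, replace_single]
  have h := chain_eq_escLoop s.toList
  simp only [repl] at h
  rw [h]
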